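-- pv_equiv track=rewrite | github.com/luuquangvu/hass_local_openai_llm | custom_components/local_openai/entity.py | _consume_emphasis
-- ===== SOURCE A (Python) =====
-- def _should_strip_emphasis(inner: str) -> bool:
--     """Return True if the emphasis markers should be removed."""
--     trimmed = inner.strip()
--     if not trimmed:
--         return True
--     if inner != trimmed:
--         return False
--     return True
--
-- def _consume_emphasis(buffer: str, flush: bool = False) -> tuple[str, str]:
--     """Strip emphasis markers from the buffer and return remaining text."""
--     output_parts: list[str] = []
--     idx = 0
--     length = len(buffer)
--
--     while idx < length:
--         start = buffer.find("**", idx)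
--         if start == -1:
--             output_parts.append(buffer[idx:])
--             return "".join(output_parts), ""
--
--         output_parts.append(buffer[idx:start])
--         end = buffer.find("**", start + 2)
--
--         if end == -1:
--             if flush:
--                 output_parts.append(buffer[start:])
--                 return "".join(output_parts), ""
--             return "".join(output_parts), buffer[start:]
--
--         inner = buffer[start + 2 : end]
--         if _should_strip_emphasis(inner):
--             output_parts.append(inner)
--         else:
--             output_parts.append(buffer[start : end + 2])
--
--         idx = end + 2
--
--     return "".join(output_parts), ""
-- ===== SOURCE B (Python) =====
-- def _should_strip_emphasis(inner: str) -> bool: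
--     """Return True if the emphasis markers should be removed."""
--     trimmed = inner.strip()
--     if not trimmed:
--         return True
--     if inner != trimmed:
--         return False
--     return True
--
-- def _consume_emphasis(buffer: str, flush: bool = False) -> tuple[str, str]:
--     """Strip emphasis markers: split once on '**' and walk the parts pairwise."""
--     parts = buffer.split("**")
--     out = [parts[0]]
--     i = 1
--     while i + 1 < len(parts):
--         inner = parts[i]
--         out.append(inner if _should_strip_emphasis(inner) else "**" + inner + "**")
--         out.append(parts[i + 1])
--         i += 2
--     if i < len(parts):
--         pending = "**" + parts[i]
--         if flush:
--             out.append(pending)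
--             pending = ""
--         return "".join(out), pending
--     return "".join(out), ""
-- ===== Notes on version B (the rewrite author's own statement) =====
-- stated objective: alternative
-- what changed: Replaces A's index-cursor loop with two str.find calls per iteration by a single str.split on the double-asterisk marker followed by a pairwise walk over the parts (inner, following-text), rebuilding the dangling-marker tail from the last odd token.
import Mathlib
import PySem

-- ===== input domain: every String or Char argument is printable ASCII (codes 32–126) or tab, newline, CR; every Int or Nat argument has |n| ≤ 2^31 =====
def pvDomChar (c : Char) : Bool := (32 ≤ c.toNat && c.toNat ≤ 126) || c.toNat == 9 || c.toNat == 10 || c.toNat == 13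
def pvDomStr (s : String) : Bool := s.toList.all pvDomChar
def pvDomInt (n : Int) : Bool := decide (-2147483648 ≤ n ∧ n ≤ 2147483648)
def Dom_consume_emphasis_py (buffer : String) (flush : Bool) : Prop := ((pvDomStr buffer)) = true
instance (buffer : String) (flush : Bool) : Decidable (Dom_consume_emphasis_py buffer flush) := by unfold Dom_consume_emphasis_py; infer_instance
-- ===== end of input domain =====

-- B re-implements A's repeated-find scanning loop by splitting the buffer on "**" once and
-- walking the parts pairwise (objective: alternative decomposition, same asymptotic cost).

-- the '**' marker, shared by both ports
def emphSep : List Char := ['*', '*']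

-- port of _should_strip_emphasis (identical helper in both Pythons)
def should_strip_emphasis (inner : List Char) : Bool :=
  let trimmed := PySem.Chars.strip inner
  if trimmed = [] then true
  else if inner ≠ trimmed then false
  else true

-- ===== PORT A =====
-- A's while-loop: idx cursor, buffer.find("**", idx) twice per iteration; fuel = |buffer|+1 (idx strictly increases)
def consume_emphasis_py_go (buf : List Char) (flush : Bool) : Nat → Nat → List (List Char) → List Char × List Char
  | 0, _, acc => (PySem.Chars.join [] acc, [])
  | fuel + 1, idx, acc =>
    if idx < buf.length then
      let start := PySem.Chars.findFrom buf emphSep (idx : Int)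
      if start = -1 then
        (PySem.Chars.join [] (acc ++ [PySem.List.slice buf (some (idx : Int)) none]), [])
      else
        let acc1 := acc ++ [PySem.List.slice buf (some (idx : Int)) (some start)]
        let e := PySem.Chars.findFrom buf emphSep (start + 2)
        if e = -1 then
          if flush then
            (PySem.Chars.join [] (acc1 ++ [PySem.List.slice buf (some start) none]), [])
          else
            (PySem.Chars.join [] acc1, PySem.List.slice buf (some start) none)
        else
          let inner := PySem.List.slice buf (some (start + 2)) (some e)
          let acc2 := if should_strip_emphasis inner then acc1 ++ [inner]
                      else acc1 ++ [PySem.List.slice buf (some start) (some (e + 2))]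
          consume_emphasis_py_go buf flush fuel (e.toNat + 2) acc2
    else (PySem.Chars.join [] acc, [])

def consume_emphasis_py (buffer : String) (flush : Bool) : String × String :=
  let r := consume_emphasis_py_go buffer.toList flush (buffer.toList.length + 1) 0 []
  (String.ofList r.1, String.ofList r.2)

-- ===== PORT B =====
-- Source B's pairwise walk over parts[1:]: (inner, following-text) pairs, one dangling token = pending
def consume_emphasis_py_alt_walk (flush : Bool) : List (List Char) → List (List Char) × List Char
  | [] => ([], [])
  | [last] => if flush then ([emphSep ++ last], []) else ([], emphSep ++ last)
  | inner :: nxt :: rest =>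
      let piece := if should_strip_emphasis inner then inner else emphSep ++ inner ++ emphSep
      let r := consume_emphasis_py_alt_walk flush rest
      (piece :: nxt :: r.1, r.2)

def consume_emphasis_py_alt (buffer : String) (flush : Bool) : String × String :=
  match PySem.Chars.splitOn buffer.toList emphSep with
  | [] => ("", "")  -- unreachable: str.split never returns an empty list
  | p0 :: rest =>
      let r := consume_emphasis_py_alt_walk flush rest
      (String.ofList (PySem.Chars.join [] (p0 :: r.1)), String.ofList r.2)

-- ===== PRECONDITION & SPEC =====
def Spec_consume_emphasis_py (buffer : String) (flush : Bool) (out : String × String) : Prop := out = consume_emphasis_py_alt buffer flush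
instance (buffer : String) (flush : Bool) (out : String × String) : Decidable (Spec_consume_emphasis_py buffer flush out) := by unfold Spec_consume_emphasis_py; infer_instance

-- ===== CLAIM (what is proved, stated in full; the proofs are below) =====
def Claim_equal_consume_emphasis_py : Prop := ∀ (buffer : String) (flush : Bool), Dom_consume_emphasis_py buffer flush → Spec_consume_emphasis_py buffer flush (consume_emphasis_py buffer flush)

-- ===== LEMMAS AND PROOFS =====

-- "".join is concatenation: only the list shapes differ between the two sides
theorem intercalate_nil_eq_flatten (xs : List (List Char)) :
    List.intercalate ([] : List Char) xs = xs.flatten := by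
  induction xs with
  | nil => rfl
  | cons h t ih =>
    cases t with
    | nil => simp [List.intercalate]
    | cons a b =>
      simp only [List.intercalate] at *
      simp only [List.intersperse] at *
      simp [ih]

theorem join_nil_eq_flatten (xs : List (List Char)) : PySem.Chars.join [] xs = xs.flatten := by
  simp [PySem.Chars.join, intercalate_nil_eq_flatten]

-- splitOn.go never returns the empty list
theorem splitOn_go_ne_nil (sep : List Char) :
    ∀ (fuel : Nat) (l cur : List Char) (acc : List (List Char)),
      PySem.Chars.splitOn.go sep fuel l cur acc ≠ [] := by
  intro fuel
  induction fuel with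
  | zero => intro l cur acc; simp [PySem.Chars.splitOn.go]
  | succ n ih =>
    intro l cur acc
    cases l with
    | nil => simp [PySem.Chars.splitOn.go]
    | cons c rest =>
      rw [PySem.Chars.splitOn.go]
      split_ifs with h
      · exact ih _ _ _
      · exact ih _ _ _

theorem splitOn_ne_nil (s sep : List Char) : PySem.Chars.splitOn s sep ≠ [] :=
  splitOn_go_ne_nil sep _ s [] []

-- the accumulator of splitOn.go is a prefix of the result
theorem splitOn_go_acc (sep : List Char) :
    ∀ (fuel : Nat) (l cur : List Char) (acc : List (List Char)),
      PySem.Chars.splitOn.go sep fuel l cur acc =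
        acc.reverse ++ PySem.Chars.splitOn.go sep fuel l cur [] := by
  intro fuel
  induction fuel with
  | zero => intro l cur acc; simp [PySem.Chars.splitOn.go]
  | succ n ih =>
    intro l cur acc
    cases l with
    | nil => simp [PySem.Chars.splitOn.go]
    | cons c rest =>
      rw [PySem.Chars.splitOn.go, PySem.Chars.splitOn.go]
      split_ifs with h
      · rw [ih _ _ (cur.reverse :: acc), ih _ _ [cur.reverse]]
        simp
      · exact ih _ _ acc

-- fuel irrelevance above the trace length (sep nonempty)
theorem splitOn_go_fuel (sep : List Char) (hsep : sep ≠ []) :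
    ∀ (fuel : Nat), ∀ (fuel' : Nat) (l cur : List Char) (acc : List (List Char)),
      l.length < fuel → l.length < fuel' →
      PySem.Chars.splitOn.go sep fuel l cur acc = PySem.Chars.splitOn.go sep fuel' l cur acc := by
  intro fuel
  induction fuel with
  | zero => intro fuel' l cur acc h1 h2; omega
  | succ n ih =>
    intro fuel' l cur acc h1 h2
    cases l with
    | nil =>
      cases fuel' with
      | zero => simp at h2
      | succ m => simp [PySem.Chars.splitOn.go]
    | cons c rest =>
      cases fuel' with
      | zero => simp at h2
      | succ m =>
        rw [PySem.Chars.splitOn.go, PySem.Chars.splitOn.go]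
        split_ifs with h
        · have hlen : sep.length ≥ 1 := by
            cases sep with
            | nil => exact absurd rfl hsep
            | cons a b => simp
          apply ih
          · simp [List.length_drop]; simp at h1; omega
          · simp [List.length_drop]; simp at h2; omega
        · apply ih <;> simp at h1 h2 ⊢ <;> omega

-- no occurrence of sep: one piece
theorem splitOn_go_no_occ (sep : List Char) :
    ∀ (l : List Char) (fuel : Nat) (cur : List Char),
      l.length < fuel → ¬ sep <:+: l →
      PySem.Chars.splitOn.go sep fuel l cur [] = [cur.reverse ++ l] := by
  intro l
  induction l with
  | nil =>
    intro fuel cur h1 h2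
    cases fuel with
    | zero => omega
    | succ n => simp [PySem.Chars.splitOn.go]
  | cons c rest ih =>
    intro fuel cur h1 h2
    cases fuel with
    | zero => simp at h1
    | succ n =>
      rw [PySem.Chars.splitOn.go]
      have hnp : sep.isPrefixOf (c :: rest) = false := by
        rw [Bool.eq_false_iff]
        intro hp
        exact h2 ((List.isPrefixOf_iff_prefix.mp hp).isInfix)
      rw [hnp]
      simp only [Bool.false_eq_true, if_false]
      have : ¬ sep <:+: rest := fun hinf => h2 (hinf.trans (List.suffix_cons c rest).isInfix)
      rw [ih n (c :: cur) (by simp at h1 ⊢; omega) this]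
      simp

theorem splitOn_no_occ (s sep : List Char) (h : ¬ sep <:+: s) :
    PySem.Chars.splitOn s sep = [s] := by
  rw [PySem.Chars.splitOn, splitOn_go_no_occ sep s (s.length + 1) [] (by omega) h]
  simp

-- first occurrence of sep at position k: peel one piece
theorem splitOn_go_first_occ (sep : List Char) (hsep : sep ≠ []) :
    ∀ (k : Nat) (l cur : List Char) (fuel : Nat),
      l.length < fuel → sep <+: l.drop k → (∀ i < k, ¬ sep <+: l.drop i) →
      PySem.Chars.splitOn.go sep fuel l cur [] =
        (cur.reverse ++ l.take k) :: PySem.Chars.splitOn (l.drop (k + sep.length)) sep := by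
  intro k
  induction k with
  | zero =>
    intro l cur fuel h1 hocc hmin
    cases fuel with
    | zero => omega
    | succ n =>
      have hlen : sep.length ≥ 1 := by
        cases sep with
        | nil => exact absurd rfl hsep
        | cons a b => simp
      simp only [List.drop_zero] at hocc
      have hlnil : l ≠ [] := by
        intro h; subst h
        exact hsep (List.prefix_nil.mp hocc)
      cases l with
      | nil => exact absurd rfl hlnil
      | cons c rest =>
        rw [PySem.Chars.splitOn.go]
        rw [List.isPrefixOf_iff_prefix.mpr hocc]
        simp only [if_true]
        rw [splitOn_go_acc]
        rw [splitOn_go_fuel sep hsep n ((List.drop sep.length (c :: rest)).length + 1) _ _ _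
              (by simp at h1 ⊢; omega) (by omega)]
        simp [PySem.Chars.splitOn]
  | succ k ih =>
    intro l cur fuel h1 hocc hmin
    have h0 : ¬ sep <+: l.drop 0 := hmin 0 (Nat.succ_pos k)
    simp only [List.drop_zero] at h0
    have hlnil : l ≠ [] := by
      intro h; subst h
      simp at hocc
      exact hsep hocc
    cases l with
    | nil => exact absurd rfl hlnil
    | cons c rest =>
      cases fuel with
      | zero => simp at h1
      | succ n =>
        rw [PySem.Chars.splitOn.go]
        have hnp : sep.isPrefixOf (c :: rest) = false := by
          rw [Bool.eq_false_iff]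
          intro hp
          exact h0 (List.isPrefixOf_iff_prefix.mp hp)
        rw [hnp]
        simp only [Bool.false_eq_true, if_false]
        rw [ih rest (c :: cur) n (by simp at h1 ⊢; omega)
              (by simpa using hocc)
              (fun i hi => by simpa using hmin (i + 1) (by omega))]
        simp [List.drop_succ_cons, Nat.add_right_comm]

theorem splitOn_first_occ (s sep : List Char) (k : Nat) (hsep : sep ≠ [])
    (h1 : sep <+: s.drop k) (h2 : ∀ i < k, ¬ sep <+: s.drop i) :
    PySem.Chars.splitOn s sep = s.take k :: PySem.Chars.splitOn (s.drop (k + sep.length)) sep := by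
  rw [PySem.Chars.splitOn, splitOn_go_first_occ sep hsep k s [] (s.length + 1) (by omega) h1 h2]
  simp

-- B's post-split walk, packaged with the accumulated output parts
def combineParts (flush : Bool) (acc : List (List Char)) (ps : List (List Char)) : List Char × List Char :=
  match ps with
  | [] => (PySem.Chars.join [] acc, [])
  | p0 :: rest =>
      let r := consume_emphasis_py_alt_walk flush rest
      (PySem.Chars.join [] (acc ++ p0 :: r.1), r.2)

-- main loop invariant: A's scanning loop from idx equals B's walk over the split of the remaining suffix
theorem go_eq_combine (buf : List Char) (flush : Bool) :
    ∀ (fuel idx : Nat) (acc : List (List Char)),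
      idx ≤ buf.length → buf.length - idx < fuel →
      consume_emphasis_py_go buf flush fuel idx acc =
        combineParts flush acc (PySem.Chars.splitOn (buf.drop idx) emphSep) := by
  intro fuel
  induction fuel with
  | zero => intro idx acc h1 h2; omega
  | succ n ih =>
    intro idx acc h1 h2
    rw [consume_emphasis_py_go]
    by_cases hlt : idx < buf.length
    · rw [if_pos hlt]
      rw [PySem.Chars.findFrom_natCast buf emphSep idx h1]
      by_cases hf : PySem.Chars.find (buf.drop idx) emphSep = -1
      · rw [if_pos hf]
        have hno : ¬ emphSep <:+: buf.drop idx := (PySem.Chars.find_eq_neg_one_iff _ _).mp hf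
        rw [splitOn_no_occ _ _ hno]
        simp [combineParts, consume_emphasis_py_alt_walk, join_nil_eq_flatten,
              PySem.List.slice_from_natCast]
      · rw [if_neg hf]
        have hk0 : 0 ≤ PySem.Chars.find (buf.drop idx) emphSep := by
          have := PySem.Chars.neg_one_le_find (buf.drop idx) emphSep
          omega
        set s := buf.drop idx with hs
        obtain ⟨k, hk⟩ : ∃ k : Nat, PySem.Chars.find s emphSep = (k : Int) :=
          ⟨(PySem.Chars.find s emphSep).toNat, (Int.toNat_of_nonneg hk0).symm⟩
        rw [hk]
        have hspec := PySem.Chars.find_spec (s := s) (sub := emphSep) hk0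
        rw [hk] at hspec
        simp only [Int.toNat_natCast] at hspec
        obtain ⟨hpre, hmin⟩ := hspec
        have hslen : s.length = buf.length - idx := by rw [hs, List.length_drop]
        have hk2 : k + 2 ≤ s.length := by
          have := hpre.length_le
          simp [List.length_drop, emphSep] at this
          omega
        have hsepne : emphSep ≠ [] := by simp [emphSep]
        have hsplit : PySem.Chars.splitOn s emphSep =
            s.take k :: PySem.Chars.splitOn (s.drop (k + 2)) emphSep := by
          have := splitOn_first_occ s emphSep k hsepne hpre hmin
          simpa [emphSep] using this
        set s2 := s.drop (k + 2) with hs2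
        obtain ⟨t, ht⟩ := hpre
        have hdk : s.drop k = emphSep ++ s2 := by
          have hdd : List.drop 2 (List.drop k s) = List.drop (k + 2) s := List.drop_drop
          have ht2 : s2 = t := by
            rw [hs2, ← hdd, ← ht]
            simp [emphSep]
          rw [← ht, ht2]
        have hstart : ((idx : Int) + (k : Int)) ≠ -1 := by omega
        simp only []
        rw [if_neg hstart]
        have hsl1 : PySem.List.slice buf (some (idx : Int)) (some ((idx : Int) + (k : Int))) = s.take k := by
          have : ((idx : Int) + (k : Int)) = (((idx + k : Nat)) : Int) := by push_cast; ring
          have h' : idx + k - idx = k := by omega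
          rw [this, PySem.List.slice_natCast, h', hs]
        have hcast2 : ((idx : Int) + (k : Int) + 2) = (((idx + k + 2 : Nat)) : Int) := by push_cast; ring
        have hdrop2 : buf.drop (idx + k + 2) = s2 := by
          rw [hs2, hs, List.drop_drop, Nat.add_assoc]
        rw [hcast2, PySem.Chars.findFrom_natCast buf emphSep (idx + k + 2) (by omega), hdrop2]
        by_cases hf2 : PySem.Chars.find s2 emphSep = -1
        · rw [if_pos hf2]
          have hno2 : ¬ emphSep <:+: s2 := (PySem.Chars.find_eq_neg_one_iff _ _).mp hf2
          have hsl2 : PySem.List.slice buf (some ((idx : Int) + (k : Int))) none = s.drop k := by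
            have : ((idx : Int) + (k : Int)) = (((idx + k : Nat)) : Int) := by push_cast; ring
            rw [this, PySem.List.slice_from_natCast, hs, List.drop_drop]
          rw [hsplit, splitOn_no_occ _ _ hno2]
          cases flush <;>
            simp [combineParts, consume_emphasis_py_alt_walk, join_nil_eq_flatten, hsl1, hsl2, hdk]
        · rw [if_neg hf2]
          have hm0 : 0 ≤ PySem.Chars.find s2 emphSep := by
            have := PySem.Chars.neg_one_le_find s2 emphSep
            omega
          obtain ⟨m, hm⟩ : ∃ m : Nat, PySem.Chars.find s2 emphSep = (m : Int) :=
            ⟨(PySem.Chars.find s2 emphSep).toNat, (Int.toNat_of_nonneg hm0).symm⟩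
          rw [hm]
          have hspec2 := PySem.Chars.find_spec (s := s2) (sub := emphSep) hm0
          rw [hm] at hspec2
          simp only [Int.toNat_natCast] at hspec2
          obtain ⟨hpre2, hmin2⟩ := hspec2
          have hm2 : m + 2 ≤ s2.length := by
            have := hpre2.length_le
            simp [List.length_drop, emphSep] at this
            omega
          have hs2len : s2.length = s.length - (k + 2) := by rw [hs2, List.length_drop]
          have hsplit2 : PySem.Chars.splitOn s2 emphSep =
              s2.take m :: PySem.Chars.splitOn (s2.drop (m + 2)) emphSep := by
            have := splitOn_first_occ s2 emphSep m hsepne hpre2 hmin2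
            simpa [emphSep] using this
          have hecast : (((idx + k + 2 : Nat) : Int) + (m : Int)) = (((idx + k + 2 + m : Nat)) : Int) := by
            push_cast; ring
          have hene : (((idx + k + 2 : Nat) : Int) + (m : Int)) ≠ -1 := by omega
          rw [if_neg hene]
          have hinner : PySem.List.slice buf (some ((idx + k + 2 : Nat) : Int))
              (some (((idx + k + 2 : Nat) : Int) + (m : Int))) = s2.take m := by
            have h' : idx + k + 2 + m - (idx + k + 2) = m := by omega
            rw [hecast, PySem.List.slice_natCast, h', hdrop2]
          have hpiece : PySem.List.slice buf (some ((idx : Int) + (k : Int)))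
              (some ((((idx + k + 2 : Nat) : Int) + (m : Int)) + 2)) = emphSep ++ s2.take m ++ emphSep := by
            have hc1 : ((idx : Int) + (k : Int)) = (((idx + k : Nat)) : Int) := by push_cast; ring
            have hc2 : ((((idx + k + 2 : Nat) : Int) + (m : Int)) + 2) = (((idx + k + m + 4 : Nat)) : Int) := by
              push_cast; ring
            rw [hc1, hc2, PySem.List.slice_natCast]
            have hdq : List.drop (idx + k) buf = s.drop k := by
              rw [hs, List.drop_drop]
            rw [hdq, hdk]
            have htk : idx + k + m + 4 - (idx + k) = m + 4 := by omega
            rw [htk, List.take_append]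
            have h24 : m + 4 - emphSep.length = m + 2 := by simp [emphSep]
            rw [h24]
            have hta : List.take (m + 2) s2 = List.take m s2 ++ List.take 2 (List.drop m s2) :=
              List.take_add
            have htp : List.take 2 (List.drop m s2) = emphSep := by
              have := List.prefix_iff_eq_take.mp hpre2
              simpa [emphSep] using this.symm
            rw [hta, htp, List.take_of_length_le (by simp [emphSep])]
            simp
          have hetoNat : ((((idx + k + 2 : Nat) : Int) + (m : Int))).toNat + 2 = idx + k + 2 + m + 2 := by
            omega
          rw [hetoNat]
          have hdrop3 : buf.drop (idx + k + 2 + m + 2) = s2.drop (m + 2) := by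
            rw [hs2, hs, List.drop_drop, List.drop_drop]
            have h' : idx + (k + 2 + (m + 2)) = idx + k + 2 + m + 2 := by omega
            rw [h']
          rw [ih (idx + k + 2 + m + 2) _ (by omega) (by omega), hdrop3]
          rw [hsplit, hsplit2]
          rcases hq : PySem.Chars.splitOn (s2.drop (m + 2)) emphSep with _ | ⟨q0, qrest⟩
          · exact absurd hq (splitOn_ne_nil _ _)
          · rw [hinner, hsl1, hpiece]
            by_cases hstrip : should_strip_emphasis (s2.take m) = true <;>
              simp [hstrip, combineParts, consume_emphasis_py_alt_walk, join_nil_eq_flatten]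
    · have hnil : buf.drop idx = [] := List.drop_eq_nil_of_le (by omega)
      rw [if_neg hlt, hnil]
      have hsp : PySem.Chars.splitOn ([] : List Char) emphSep = [[]] := rfl
      rw [hsp]
      simp [combineParts, consume_emphasis_py_alt_walk, join_nil_eq_flatten]

-- ===== VERDICT (by name: the statement is the Claim_ definition above) =====
theorem consume_emphasis_py_spec : Claim_equal_consume_emphasis_py := by
  intro buffer flush _
  unfold Spec_consume_emphasis_py consume_emphasis_py consume_emphasis_py_alt
  rw [go_eq_combine buffer.toList flush (buffer.toList.length + 1) 0 [] (by omega) (by omega)]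
  simp only [List.drop_zero]
  rcases h : PySem.Chars.splitOn buffer.toList emphSep with _ | ⟨p0, rest⟩
  · exact absurd h (splitOn_ne_nil _ _)
  · simp [combineParts]
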